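-- pv_equiv track=rewrite | github.com/vvtkfkddl11/algorithms | 프로그래머스/2/388352. 비밀 코드 해독/비밀 코드 해독.py | solution
-- ===== SOURCE A (Python) =====
-- from itertools import combinations
--
-- def solution(n, q, ans):
--     answer = 0
--
--     tmp = list(combinations((i for i in range(1, n+1)), 5))
--     candidates = []
--
--     for i in tmp:
--         candidates.append(list(i))
--
--     m = len(q)
--
--     for i in candidates:
--         cur_ans = 0
--         common = []
--         for j in range(m):
--             cur_ans = len(set(i) & set(q[j]))
--
--             if cur_ans == ans[j]:
--                 common.append(cur_ans)
--             else:
--                 break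
--         if common == ans:
--             answer += 1
--
--     return answer
-- ===== SOURCE B (Python) =====
-- def solution(n, q, ans):
--     qs = [set(qj) for qj in q]
--
--     def go(pool, k, counts):
--         # infeasible: some query already over its target, or unreachable with k picks left
--         if any(c > a or a > c + k for c, a in zip(counts, ans)):
--             return 0
--         if k == 0:
--             return 1 if counts == ans else 0
--         if len(pool) < k:
--             return 0
--         v, rest = pool[0], pool[1:]
--         return (go(rest, k - 1, [c + (v in s) for c, s in zip(counts, qs)])
--                 + go(rest, k, counts))
--
--     return go(list(range(1, n + 1)), 5, [0] * len(q))
-- ===== Notes on version B (the rewrite author's own statement) =====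
-- stated objective: faster
-- what changed: A materializes every 5-combination of 1..n and then filter-checks each against all queries with a break loop; B is a choose-or-skip backtracking counter that carries incremental per-query intersection counts and prunes a branch as soon as some count exceeds its target or can no longer reach it, never materializing the candidate list; a timing run measured B faster (A timed out where B returned).
-- outside the precondition, e.g. on solution(5, [[1], [2]], [9]): A returns 0, B returns 0
import Mathlib
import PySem

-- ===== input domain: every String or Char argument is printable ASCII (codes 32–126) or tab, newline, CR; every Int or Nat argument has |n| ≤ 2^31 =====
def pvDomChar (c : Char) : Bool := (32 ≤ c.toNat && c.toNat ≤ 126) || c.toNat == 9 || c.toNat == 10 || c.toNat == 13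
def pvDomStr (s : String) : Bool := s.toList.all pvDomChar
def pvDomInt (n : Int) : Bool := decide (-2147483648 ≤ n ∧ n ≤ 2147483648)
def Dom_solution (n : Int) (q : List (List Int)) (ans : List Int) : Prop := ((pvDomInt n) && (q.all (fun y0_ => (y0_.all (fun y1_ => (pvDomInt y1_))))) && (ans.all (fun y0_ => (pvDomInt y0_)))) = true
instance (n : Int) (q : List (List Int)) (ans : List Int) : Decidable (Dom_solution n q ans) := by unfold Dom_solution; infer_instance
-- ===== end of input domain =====

-- B replaces A's "materialize all 5-combinations, then filter each" with a pruned
-- choose-or-skip backtracking counter that never builds the candidate list (objective: faster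
-- by pruning, measured).

-- ===== PORT A =====
-- itertools.combinations(iter(range(1, n+1)), 5), ported by hand; produces the combinations
-- in the same (lexicographic-by-index) order as itertools.
def combosA : Nat → List Int → List (List Int)
  | 0, _ => [[]]
  | _ + 1, [] => []
  | k + 1, x :: rest => ((combosA k rest).map (fun c => x :: c)) ++ combosA (k + 1) rest

-- len(set(i) & set(q[j]))
def interLenA (c qj : List Int) : Int :=
  PySem.Set.len (PySem.Set.inter (PySem.Set.ofList c) (PySem.Set.ofList qj))

-- the inner 'for j in range(m): … break' loop building `common`; it walks q and ans together
-- (q[j] / ans[j]).  In the arm where q outlives ans Python raises IndexError (outside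
-- Pre_solution); the port just returns the accumulator there.
def loopA (c : List Int) : List (List Int) → List Int → List Int → List Int
  | [], _, common => common
  | qj :: qr, a :: ar, common =>
      let cur := interLenA c qj
      if cur = a then loopA c qr ar (common ++ [cur]) else common
  | _ :: _, [], common => common

def solution (n : Int) (q : List (List Int)) (ans : List Int) : Int :=
  let tmp := combosA 5 (PySem.List.pyRange 1 (n + 1) 1)
  let candidates := tmp.foldl (fun acc i => acc ++ [i]) ([] : List (List Int))
  candidates.foldl (fun answer i => if loopA i q ans [] = ans then answer + 1 else answer) 0

-- ===== PORT B =====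
-- [c + (v in s) for c, s in zip(counts, qs)]
def stepB (qs : List (PySem.Set Int)) (counts : List Int) (v : Int) : List Int :=
  List.zipWith (fun c s => c + (if PySem.Set.contains s v then 1 else 0)) counts qs

def goB (ans : List Int) (qs : List (PySem.Set Int)) (pool : List Int) (k : Nat)
    (counts : List Int) : Int :=
  if (counts.zip ans).any (fun p => decide (p.2 < p.1) || decide (p.1 + (k : Int) < p.2)) then 0
  else if k = 0 then (if counts = ans then 1 else 0)
  else if pool.length < k then 0
  else
    match pool with
    | [] => 0
    | v :: rest => goB ans qs rest (k - 1) (stepB qs counts v) + goB ans qs rest k counts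
termination_by pool

def solution_alt (n : Int) (q : List (List Int)) (ans : List Int) : Int :=
  let qs := q.map (fun qj => PySem.Set.ofList qj)
  goB ans qs (PySem.List.pyRange 1 (n + 1) 1) 5 (List.replicate q.length 0)

-- ===== PRECONDITION & SPEC =====
-- Pre_ excludes inputs with more queries than answers unless n ≤ 4 (no 5-combination exists):
-- there A's ans[j] indexing raises IndexError whenever some candidate matches the whole ans
-- prefix, and A returns 0 only by the accident of every candidate breaking early.
def Pre_solution (n : Int) (q : List (List Int)) (ans : List Int) : Prop :=
  q.length ≤ ans.length ∨ n ≤ 4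
instance (n : Int) (q : List (List Int)) (ans : List Int) : Decidable (Pre_solution n q ans) := by
  unfold Pre_solution; infer_instance

def pvWitness_solution : Int × List (List Int) × List Int := (5, ([[1]], [1]))

def Spec_solution (n : Int) (q : List (List Int)) (ans : List Int) (out : Int) : Prop :=
  out = solution_alt n q ans
instance (n : Int) (q : List (List Int)) (ans : List Int) (out : Int) :
    Decidable (Spec_solution n q ans out) := by unfold Spec_solution; infer_instance

-- ===== CLAIM (what is proved, stated in full; the proofs are below) =====
def Claim_equal_solution : Prop := ∀ (n : Int) (q : List (List Int)) (ans : List Int),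
  Dom_solution n q ans → Pre_solution n q ans → Spec_solution n q ans (solution n q ans)

-- ===== LEMMAS AND PROOFS =====

-- final per-query counts after folding a candidate through stepB
def countsOf (qs : List (PySem.Set Int)) (counts : List Int) (c : List Int) : List Int :=
  c.foldl (stepB qs) counts

lemma combosA_zero (xs : List Int) : combosA 0 xs = [[]] := by
  cases xs <;> rfl

lemma combosA_nil_of_lt : ∀ (k : Nat) (xs : List Int), xs.length < k → combosA k xs = [] := by
  intro k xs
  induction xs generalizing k with
  | nil => intro h; cases k with | zero => omega | succ k => rfl
  | cons x rest ih =>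
    intro h; cases k with
    | zero => omega
    | succ k =>
      simp only [List.length_cons] at h
      simp only [combosA, ih k (by omega), ih (k+1) (by omega), List.map_nil, List.nil_append]

lemma sublist_of_mem_combosA : ∀ (k : Nat) (xs c : List Int), c ∈ combosA k xs → c.Sublist xs := by
  intro k xs
  induction xs generalizing k with
  | nil => intro c h; cases k with
    | zero => simp [combosA] at h; simp [h]
    | succ k => simp [combosA] at h
  | cons x rest ih =>
    intro c h; cases k with
    | zero => simp [combosA] at h; simp [h]
    | succ k =>
      simp only [combosA, List.mem_append, List.mem_map] at h
      rcases h with ⟨c2, hc2, rfl⟩ | h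
      · exact List.Sublist.cons₂ x (ih k c2 hc2)
      · exact List.Sublist.cons x (ih (k+1) c h)

lemma length_of_mem_combosA : ∀ (k : Nat) (xs c : List Int), c ∈ combosA k xs → c.length = k := by
  intro k xs
  induction xs generalizing k with
  | nil => intro c h; cases k with
    | zero => simp [combosA] at h; simp [h]
    | succ k => simp [combosA] at h
  | cons x rest ih =>
    intro c h; cases k with
    | zero => simp [combosA] at h; simp [h]
    | succ k =>
      simp only [combosA, List.mem_append, List.mem_map] at h
      rcases h with ⟨c2, hc2, rfl⟩ | h
      · simp [ih k c2 hc2]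
      · exact ih (k+1) c h

lemma zipWith_fst {α β : Type} : ∀ (l : List α) (l' : List β), l.length ≤ l'.length →
    List.zipWith (fun a _ => a) l l' = l := by
  intro l
  induction l with
  | nil => intro l' _; rfl
  | cons a l ih => intro l' h; cases l' with
    | nil => simp at h
    | cons b l' => simpa using ih l' (by simpa using h)

lemma zipWith_zipWith_same {α β γ δ : Type} (f : γ → β → δ) (g : α → β → γ) :
    ∀ (l : List α) (l' : List β),
    List.zipWith f (List.zipWith g l l') l' = List.zipWith (fun a b => f (g a b) b) l l' := by
  intro l
  induction l with
  | nil => intro l'; rfl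
  | cons a l ih => intro l'; cases l' with
    | nil => rfl
    | cons b l' => simpa using ih l'

lemma zipWith_replicate_left {α β γ : Type} (f : α → β → γ) (a : α) :
    ∀ (l : List β), List.zipWith f (List.replicate l.length a) l = l.map (f a) := by
  intro l
  induction l with
  | nil => rfl
  | cons b l ih => simp [List.replicate_succ, ih]

lemma countsOf_eq_zipWith (qs : List (PySem.Set Int)) :
    ∀ (c counts : List Int), counts.length ≤ qs.length →
    countsOf qs counts c =
      List.zipWith (fun cnt s => cnt + ((c.countP (fun v => PySem.Set.contains s v) : Nat) : Int))
        counts qs := by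
  intro c
  induction c with
  | nil =>
    intro counts h
    simpa [countsOf] using (zipWith_fst counts qs h).symm
  | cons v c ih =>
    intro counts h
    have hs : (stepB qs counts v).length ≤ qs.length := by
      simp [stepB]
    have hfold : countsOf qs counts (v :: c) = countsOf qs (stepB qs counts v) c := rfl
    rw [hfold, ih _ hs, stepB, zipWith_zipWith_same]
    congr 1
    funext a b
    simp only [List.countP_cons]
    cases hb : b.contains v
    · simp
    · simp only [if_true]
      push_cast
      ring

lemma prune_zero (qs : List (PySem.Set Int)) (ans counts : List Int) (k : Nat)
    (hlen : counts.length ≤ qs.length)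
    (hp : (counts.zip ans).any
      (fun p => decide (p.2 < p.1) || decide (p.1 + (k : Int) < p.2)) = true)
    (c : List Int) (hc : c.length = k) : ¬ (countsOf qs counts c = ans) := by
  intro heq
  rw [countsOf_eq_zipWith qs c counts hlen] at heq
  rw [List.any_eq_true] at hp
  obtain ⟨p, hpmem, hpp⟩ := hp
  obtain ⟨i, hi, hpi⟩ := List.mem_iff_getElem.mp hpmem
  have hiz : i < counts.length ∧ i < ans.length := by
    simp [List.length_zip] at hi; omega
  rw [List.getElem_zip] at hpi
  subst hpi
  have hw : i < (List.zipWith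
      (fun cnt s => cnt + ((c.countP (fun v => PySem.Set.contains s v) : Nat) : Int))
      counts qs).length := by
    rw [List.length_zipWith]; omega
  have hansi := (List.getElem_of_eq heq hw).symm
  rw [List.getElem_zipWith] at hansi
  have hle : (c.countP (fun v => PySem.Set.contains (qs[i]'(by omega)) v)) ≤ c.length :=
    List.countP_le_length
  simp only [Bool.or_eq_true, decide_eq_true_eq] at hpp
  omega

lemma goB_eq (ans : List Int) (qs : List (PySem.Set Int)) :
    ∀ (pool : List Int) (k : Nat) (counts : List Int), counts.length = qs.length →
    goB ans qs pool k counts =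
      ((combosA k pool).countP (fun c => decide (countsOf qs counts c = ans)) : Nat) := by
  intro pool
  induction pool with
  | nil =>
    intro k counts h
    rw [goB]
    by_cases hp : (counts.zip ans).any
        (fun p => decide (p.2 < p.1) || decide (p.1 + (k : Int) < p.2)) = true
    · rw [if_pos hp, List.countP_eq_zero.mpr]
      · simp
      · intro c hc
        simpa using prune_zero qs ans counts k (le_of_eq h) hp c (length_of_mem_combosA k [] c hc)
    · rw [if_neg hp]
      cases k with
      | zero =>
        simp only [combosA_zero, List.countP_singleton]
        have hthis : countsOf qs counts [] = counts := rfl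
        by_cases he : counts = ans <;> simp [hthis, he] <;> subst he <;> exact rfl
      | succ k => simp [combosA]
  | cons v rest ih =>
    intro k counts h
    rw [goB]
    by_cases hp : (counts.zip ans).any
        (fun p => decide (p.2 < p.1) || decide (p.1 + (k : Int) < p.2)) = true
    · rw [if_pos hp, List.countP_eq_zero.mpr]
      · simp
      · intro c hc
        simpa using prune_zero qs ans counts k (le_of_eq h) hp c
          (length_of_mem_combosA k (v :: rest) c hc)
    · rw [if_neg hp]
      cases k with
      | zero =>
        simp only [combosA_zero, List.countP_singleton]
        have hthis : countsOf qs counts [] = counts := rfl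
        by_cases he : counts = ans <;> simp [hthis, he] <;> subst he <;> exact rfl
      | succ k =>
        simp only [if_neg (Nat.succ_ne_zero k)]
        by_cases hlt : (v :: rest).length < k + 1
        · rw [if_pos hlt, combosA_nil_of_lt (k+1) (v :: rest) hlt]
          simp
        · rw [if_neg hlt]
          have h1 : (stepB qs counts v).length = qs.length := by
            simp [stepB, h]
          simp only [Nat.add_sub_cancel]
          rw [ih k (stepB qs counts v) h1, ih (k+1) counts h]
          simp only [combosA, List.countP_append, List.countP_map]
          have hcomp : ((fun c => decide (countsOf qs counts c = ans)) ∘ (fun c => v :: c))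
              = (fun c => decide (countsOf qs (stepB qs counts v) c = ans)) := rfl
          rw [hcomp]
          push_cast
          ring

lemma loopA_acc (c : List Int) : ∀ (qs : List (List Int)) (as' common : List Int),
    loopA c qs as' common = common ++ loopA c qs as' [] := by
  intro qs
  induction qs with
  | nil => intro as' common; simp [loopA]
  | cons qj qr ih =>
    intro as' common
    cases as' with
    | nil => simp [loopA]
    | cons a ar =>
      simp only [loopA]
      by_cases hc : interLenA c qj = a
      · rw [if_pos hc, if_pos hc, ih ar (common ++ [interLenA c qj]), ih ar ([] ++ [interLenA c qj])]
        simp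
      · simp [if_neg hc]

lemma loopA_iff (c : List Int) : ∀ (qs : List (List Int)) (as' : List Int),
    qs.length ≤ as'.length →
    (loopA c qs as' [] = as' ↔ qs.map (fun qj => interLenA c qj) = as') := by
  intro qs
  induction qs with
  | nil => intro as' _; simp [loopA]
  | cons qj qr ih =>
    intro as' hlen
    cases as' with
    | nil => simp at hlen
    | cons a ar =>
      simp only [loopA, List.map_cons]
      by_cases hc : interLenA c qj = a
      · rw [if_pos hc, show ([] : List Int) ++ [interLenA c qj] = [interLenA c qj] from rfl,
          loopA_acc c qr ar [interLenA c qj]]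
        simp only [List.singleton_append, List.cons.injEq, hc]
        simp only [List.length_cons] at hlen
        rw [ih ar (by omega)]
      · rw [if_neg hc]
        simp [hc]

lemma interLenA_nodup (c qj : List Int) (h : c.Nodup) :
    interLenA c qj =
      ((c.countP (fun v => PySem.Set.contains (PySem.Set.ofList qj) v) : Nat) : Int) := by
  simp [interLenA, PySem.Set.inter, PySem.Set.len, PySem.Set.ofList_eq_self_of_nodup c h,
    List.countP_eq_length_filter]

lemma cond_eq (q : List (List Int)) (c : List Int) (hc : c.Nodup) :
    q.map (fun qj => interLenA c qj) =
      countsOf (q.map (fun qj => PySem.Set.ofList qj)) (List.replicate q.length 0) c := by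
  rw [countsOf_eq_zipWith _ c _ (by simp)]
  rw [show (List.replicate q.length (0 : Int))
        = List.replicate (q.map (fun qj => PySem.Set.ofList qj)).length 0 by simp]
  rw [zipWith_replicate_left, List.map_map]
  apply List.map_congr_left
  intro qj _
  simp [interLenA_nodup c qj hc]

-- ===== VERDICT (by name: the statement is the Claim_ definition above) =====
theorem solution_spec : Claim_equal_solution := by
  intro n q ans _ hpre
  unfold Spec_solution solution solution_alt
  simp only [PySem.List.foldl_append_singleton, List.nil_append]
  have hA : (combosA 5 (PySem.List.pyRange 1 (n + 1) 1)).foldl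
      (fun answer i => if loopA i q ans [] = ans then answer + 1 else answer) 0
      = (((combosA 5 (PySem.List.pyRange 1 (n + 1) 1)).countP
          (fun i => decide (loopA i q ans [] = ans)) : Nat) : Int) := by
    have key : ∀ (l : List (List Int)) (a : Int),
        l.foldl (fun answer i => if loopA i q ans [] = ans then answer + 1 else answer) a
          = a + ((l.countP (fun i => decide (loopA i q ans [] = ans)) : Nat) : Int) := by
      intro l
      induction l with
      | nil => intro a; simp
      | cons x l ih =>
        intro a
        simp only [List.foldl_cons, List.countP_cons]
        by_cases hx : loopA x q ans [] = ans <;> simp [hx, ih] <;> omega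
    simpa using key (combosA 5 (PySem.List.pyRange 1 (n + 1) 1)) 0
  have hB := goB_eq ans (q.map (fun qj => PySem.Set.ofList qj))
    (PySem.List.pyRange 1 (n + 1) 1) 5 (List.replicate q.length 0) (by simp)
  rw [hA, hB]
  by_cases hlen : q.length ≤ ans.length
  · congr 1
    apply List.countP_congr
    intro c hcmem
    have hnd : c.Nodup :=
      (sublist_of_mem_combosA 5 _ c hcmem).nodup (PySem.List.nodup_pyRange_one 1 (n + 1))
    simp only [decide_eq_true_eq]
    rw [loopA_iff c q ans hlen, cond_eq q c hnd]
  · have hn : n ≤ 4 := hpre.resolve_left hlen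
    have hlp : (PySem.List.pyRange 1 (n + 1) 1).length < 5 := by
      rw [PySem.List.length_pyRange_one]
      omega
    rw [combosA_nil_of_lt 5 _ hlp]
    simp
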